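-- pv_equiv track=rewrite | github.com/kkobanenko/1C_Autoconnector | db/structure_analyzer.py | _normalize_table_name
-- ===== SOURCE A (Python) =====
-- def _normalize_table_name(table_name: str) -> str:
--     """
--     Нормализует имя таблицы (добавляет подчеркивание если нужно).
--
--     Args:
--         table_name: Имя таблицы
--
--     Returns:
--         Нормализованное имя таблицы
--     """
--     # Если имя содержит точку (табличная часть), обрабатываем отдельно
--     # Табличные части соединяются подчеркиванием: Document653.VT10121 -> _Document653_VT10121
--     if '.' in table_name:
--         parts = table_name.split('.')
--         normalized_parts = []
--         for i, part in enumerate(parts):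
--             part = part.strip('[]')
--             # Для первой части добавляем подчеркивание если нужно
--             if i == 0:
--                 if not part.startswith('_'):
--                     normalized_parts.append('_' + part)
--                 else:
--                     normalized_parts.append(part)
--             else:
--                 # Для остальных частей добавляем подчеркивание если нужно, но убираем его из начала
--                 # так как join уже добавит подчеркивание между частями
--                 part_clean = part.lstrip('_')
--                 if part_clean:
--                     normalized_parts.append('_' + part_clean)
--                 else:
--                     normalized_parts.append(part)
--         # Соединяем части одним подчеркиванием вместо точки
--         result = '_'.join(normalized_parts)
--         # Убираем возможные двойные подчеркивания
--         while '__' in result: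
--             result = result.replace('__', '_')
--         return result
--
--     # Убираем квадратные скобки если есть
--     table_name = table_name.strip('[]')
--
--     # Добавляем подчеркивание если нужно
--     if not table_name.startswith('_'):
--         return '_' + table_name
--     return table_name
-- ===== SOURCE B (Python) =====
-- def _normalize_table_name(table_name: str) -> str:
--     # Dot case: uniform build then one left-to-right collapse of underscore runs.
--     if '.' in table_name:
--         raw = '_' + '_'.join(p.strip('[]') for p in table_name.split('.'))
--         out = []
--         for c in raw:
--             if c != '_' or not out or out[-1] != '_':
--                 out.append(c)
--         return ''.join(out)
--     # Non-dot case: same as A (internal underscores are deliberately NOT collapsed here).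
--     table_name = table_name.strip('[]')
--     if not table_name.startswith('_'):
--         return '_' + table_name
--     return table_name
-- ===== Notes on version B (the rewrite author's own statement) =====
-- stated objective: simpler
-- what changed: In the dot branch, A's enumerate loop with per-position prepend logic followed by a while-loop of repeated double-underscore replacements is replaced by one uniform build (an underscore prepended to the underscore-join of the bracket-stripped parts) followed by a single left-to-right pass that drops an underscore whenever the previously kept character is an underscore; the non-dot branch keeps A's behaviour (no collapsing there).
import Mathlib
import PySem

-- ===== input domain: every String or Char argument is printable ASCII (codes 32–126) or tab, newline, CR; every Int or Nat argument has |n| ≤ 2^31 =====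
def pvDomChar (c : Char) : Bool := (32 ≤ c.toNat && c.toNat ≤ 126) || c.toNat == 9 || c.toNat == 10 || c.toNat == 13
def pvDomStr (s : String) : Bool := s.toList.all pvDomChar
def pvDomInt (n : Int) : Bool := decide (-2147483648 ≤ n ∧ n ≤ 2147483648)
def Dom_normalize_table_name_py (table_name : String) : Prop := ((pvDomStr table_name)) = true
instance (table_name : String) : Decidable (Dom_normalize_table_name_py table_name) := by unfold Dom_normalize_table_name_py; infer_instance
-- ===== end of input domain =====

-- B replaces A's enumerate loop + iterated replace('__','_') by a uniform '_'-join and ONE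
-- left-to-right collapse pass; the non-dot branch is unchanged. Objective: simpler.

-- ===== PORT A =====
-- pvRep is the effect of one Python pass s.replace('__','_'); needed for pvWhileCollapse's termination.
def pvRep : List Char → List Char
  | [] => []
  | '_' :: '_' :: t => '_' :: pvRep t
  | c :: t => c :: pvRep t

lemma pvRep_length_le (s : List Char) : (pvRep s).length ≤ s.length := by
  fun_induction pvRep <;> simp_all <;> omega

lemma pvRep_length_lt (s : List Char) (h : ['_', '_'] <:+: s) : (pvRep s).length < s.length := by
  fun_induction pvRep with
  | case1 => simp at h
  | case2 t _ => have := pvRep_length_le t; simp; omega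
  | case3 c t hne ih =>
    rcases List.infix_cons_iff.mp h with hp | hi
    · obtain ⟨r, hr⟩ := hp
      simp at hr
      obtain ⟨hc, ht⟩ := hr
      exact absurd rfl (by subst hc; subst ht; exact fun h => hne r h rfl)
    · simpa using Nat.succ_lt_succ (ih hi)

lemma pvRep_cons (c : Char) (t : List Char) (h : ¬(c = '_' ∧ t.head? = some '_')) :
    pvRep (c :: t) = c :: pvRep t := by
  rw [pvRep.eq_def]
  split <;> simp_all

lemma pvGoSpec : ∀ (fuel : Nat) (l acc : List Char), l.length ≤ fuel →
    PySem.Chars.replace.go ['_', '_'] ['_'] fuel l acc = acc.reverse ++ pvRep l := by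
  intro fuel
  induction fuel with
  | zero =>
    intro l acc h
    have hl : l = [] := by cases l <;> simp_all
    subst hl
    simp [PySem.Chars.replace.go, pvRep]
  | succ n ih =>
    intro l acc h
    cases l with
    | nil => simp [PySem.Chars.replace.go, pvRep]
    | cons c t =>
      rw [PySem.Chars.replace.go]
      by_cases hp : List.isPrefixOf ['_', '_'] (c :: t) = true
      · obtain ⟨r, hr⟩ := List.isPrefixOf_iff_prefix.mp hp
        simp only [List.cons_append, List.nil_append, List.cons.injEq] at hr
        obtain ⟨hc, ht⟩ := hr
        subst hc
        subst ht
        rw [if_pos hp]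
        rw [show List.drop ['_', '_'].length ('_' :: '_' :: r) = r from rfl]
        rw [ih r (['_'].reverse ++ acc) (by simp at h ⊢; omega)]
        simp [pvRep]
      · rw [if_neg hp, ih t (c :: acc) (by simp at h; omega)]
        have hh : ¬(c = '_' ∧ t.head? = some '_') := by
          intro ⟨h1, h2⟩
          apply hp
          cases t <;> simp_all [List.isPrefixOf]
        rw [pvRep_cons c t hh]
        simp

-- s.replace('__','_') with this fixed old/new is exactly pvRep
lemma pvReplace_eq (s : List Char) : PySem.Chars.replace s ['_', '_'] ['_'] = pvRep s := by
  rw [PySem.Chars.replace]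
  simpa using pvGoSpec s.length s [] le_rfl

-- the Python loop `while '__' in result: result = result.replace('__','_')`
def pvWhileCollapse (s : List Char) : List Char :=
  if h : PySem.Chars.isIn ['_', '_'] s then
    pvWhileCollapse (PySem.Chars.replace s ['_', '_'] ['_'])
  else s
termination_by s.length
decreasing_by
  rw [pvReplace_eq]
  exact pvRep_length_lt s ((PySem.Chars.isIn_iff_infix _ _).mp h)

def normalize_table_name_py (table_name : String) : String :=
  let cs := table_name.toList
  if PySem.Chars.isIn ['.'] cs then
    let parts := PySem.Chars.splitOn cs ['.']
    let normalized_parts := (PySem.List.enumerate parts).foldl (fun acc ip =>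
      let part := PySem.Chars.stripChars ip.2 ['[', ']']
      if ip.1 == 0 then
        if ¬ PySem.Chars.startswith part ['_'] then acc ++ ['_' :: part]
        else acc ++ [part]
      else
        let part_clean := part.dropWhile (fun c => c == '_')  -- part.lstrip('_'): exact
        if ¬ part_clean.isEmpty then acc ++ ['_' :: part_clean]
        else acc ++ [part]) []
    let result := PySem.Chars.join ['_'] normalized_parts
    String.ofList (pvWhileCollapse result)
  else
    let t := PySem.Chars.stripChars cs ['[', ']']
    if ¬ PySem.Chars.startswith t ['_'] then String.ofList ('_' :: t)
    else String.ofList t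

-- ===== PORT B =====
-- Source B's loop body: keep c unless it is '_' and the last kept char is '_' (out[-1] via pyGet?)
def pvCollapseStep (out : List Char) (c : Char) : List Char :=
  if c ≠ '_' ∨ out = [] ∨ PySem.List.pyGet? out (-1) ≠ some '_' then out ++ [c] else out

def normalize_table_name_py_alt (table_name : String) : String :=
  let cs := table_name.toList
  if PySem.Chars.isIn ['.'] cs then
    let raw := '_' :: PySem.Chars.join ['_']
      ((PySem.Chars.splitOn cs ['.']).map (fun p => PySem.Chars.stripChars p ['[', ']']))
    String.ofList (raw.foldl pvCollapseStep [])
  else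
    let t := PySem.Chars.stripChars cs ['[', ']']
    if ¬ PySem.Chars.startswith t ['_'] then String.ofList ('_' :: t)
    else String.ofList t

-- ===== PRECONDITION & SPEC =====
def Spec_normalize_table_name_py (table_name : String) (out : String) : Prop := out = normalize_table_name_py_alt table_name
instance (table_name : String) (out : String) : Decidable (Spec_normalize_table_name_py table_name out) := by unfold Spec_normalize_table_name_py; infer_instance

-- ===== CLAIM (what is proved, stated in full; the proofs are below) =====
def Claim_equal_normalize_table_name_py : Prop := ∀ (table_name : String), Dom_normalize_table_name_py table_name → Spec_normalize_table_name_py table_name (normalize_table_name_py table_name)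

-- ===== LEMMAS AND PROOFS =====

-- the canonical one-pass collapse, with state b = "previous char was '_'"
def pvC1 : Bool → List Char → List Char
  | _, [] => []
  | b, c :: t => if c == '_' && b then pvC1 true t else c :: pvC1 (c == '_') t

def pvSt : Bool → List Char → Bool
  | b, [] => b
  | _, c :: t => pvSt (c == '_') t

def pvCeq (x y : List Char) : Prop := ∀ b, pvC1 b x = pvC1 b y ∧ pvSt b x = pvSt b y

lemma pvC1_append (x y : List Char) : ∀ b, pvC1 b (x ++ y) = pvC1 b x ++ pvC1 (pvSt b x) y := by
  induction x with
  | nil => intro b; simp [pvC1, pvSt]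
  | cons c t ih =>
    intro b
    by_cases h : ((c == '_') && b) = true
    · have h2 := h
      simp only [Bool.and_eq_true, beq_iff_eq] at h2
      obtain ⟨hc, hb⟩ := h2
      subst hc; subst hb
      simp [pvC1, pvSt, h, ih]
    · simp [pvC1, pvSt, h, ih]

lemma pvSt_append (x y : List Char) : ∀ b, pvSt b (x ++ y) = pvSt (pvSt b x) y := by
  induction x with
  | nil => intro b; simp [pvSt]
  | cons c t ih => intro b; simp [pvSt, ih]

lemma pvCeq_refl (x : List Char) : pvCeq x x := fun _ => ⟨rfl, rfl⟩

lemma pvCeq_trans {x y z : List Char} (h1 : pvCeq x y) (h2 : pvCeq y z) : pvCeq x z :=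
  fun b => ⟨(h1 b).1.trans (h2 b).1, (h1 b).2.trans (h2 b).2⟩

lemma pvCeq_symm {x y : List Char} (h : pvCeq x y) : pvCeq y x :=
  fun b => ⟨(h b).1.symm, (h b).2.symm⟩

lemma pvCeq_append {x y u v : List Char} (h1 : pvCeq x y) (h2 : pvCeq u v) :
    pvCeq (x ++ u) (y ++ v) := by
  intro b
  constructor
  · rw [pvC1_append, pvC1_append, (h1 b).1, (h1 b).2, (h2 _).1]
  · rw [pvSt_append, pvSt_append, (h1 b).2, (h2 _).2]

lemma pvCeq_dd (x : List Char) : pvCeq ('_' :: '_' :: x) ('_' :: x) := by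
  intro b; cases b <;> simp [pvCeq, pvC1, pvSt]

lemma pvCeq_drop (x : List Char) : pvCeq ('_' :: x.dropWhile (fun c => c == '_')) ('_' :: x) := by
  induction x with
  | nil => exact pvCeq_refl _
  | cons c t ih =>
    by_cases hc : c = '_'
    · subst hc
      rw [List.dropWhile_cons_of_pos (by simp)]
      exact pvCeq_trans ih (pvCeq_symm (pvCeq_dd t))
    · rw [List.dropWhile_cons_of_neg (by simpa using hc)]
      exact pvCeq_refl _

lemma pvC1_pvRep (s : List Char) : ∀ b, pvC1 b (pvRep s) = pvC1 b s := by
  fun_induction pvRep s with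
  | case1 => intro b; rfl
  | case2 t ih => intro b; cases b <;> simp [pvC1, ih]
  | case3 c t hne ih =>
    intro b
    by_cases h : ((c == '_') && b) = true <;> simp [pvC1, h, ih]

lemma pvC1_fixAux (s : List Char) (h : ¬ (['_', '_'] <:+: s)) :
    pvC1 false s = s ∧ (s.head? ≠ some '_' → pvC1 true s = s) := by
  induction s with
  | nil => simp [pvC1]
  | cons c t ih =>
    have h' : ¬ (['_', '_'] <:+: t) := fun hi => h (List.infix_cons_iff.mpr (Or.inr hi))
    obtain ⟨h1, h2⟩ := ih h'
    constructor
    · by_cases hc : c = '_'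
      · subst hc
        have ht : t.head? ≠ some '_' := by
          intro hh
          cases t with
          | nil => simp at hh
          | cons d t' =>
            simp at hh
            subst hh
            exact h (List.infix_cons_iff.mpr (Or.inl ⟨t', rfl⟩))
        simp [pvC1, h2 ht]
      · have hcb : (c == '_') = false := by simp [hc]
        simp [pvC1, hcb, h1]
    · intro hh
      have hc : ¬ (c = '_') := by simpa using hh
      have hcb : (c == '_') = false := by simp [hc]
      simp [pvC1, hcb, h1]

lemma pvC1_fix (s : List Char) (h : ¬ (['_', '_'] <:+: s)) : pvC1 false s = s :=
  (pvC1_fixAux s h).1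

lemma pvWhileCollapse_eq (s : List Char) : pvWhileCollapse s = pvC1 false s := by
  fun_induction pvWhileCollapse s with
  | case1 s h ih => rw [ih, pvReplace_eq, pvC1_pvRep]
  | case2 s h =>
    exact (pvC1_fix s ((PySem.Chars.isIn_eq_false_iff _ _).mp (by simpa using h))).symm


-- splitOn always returns at least one part
lemma pvGoSplit_ne_nil : ∀ (fuel : Nat) (l cur : List Char) (acc : List (List Char)),
    PySem.Chars.splitOn.go ['.'] fuel l cur acc ≠ [] := by
  intro fuel
  induction fuel with
  | zero => intro l cur acc; rw [PySem.Chars.splitOn.go]; simp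
  | succ n ih =>
    intro l cur acc
    cases l with
    | nil => simp [PySem.Chars.splitOn.go]
    | cons c t =>
      rw [PySem.Chars.splitOn.go]
      by_cases hp : List.isPrefixOf ['.'] (c :: t) = true
      · rw [if_pos hp]; exact ih _ _ _
      · rw [if_neg hp]; exact ih _ _ _

lemma pvSplit_ne_nil (cs : List Char) : PySem.Chars.splitOn cs ['.'] ≠ [] := by
  rw [PySem.Chars.splitOn]; exact pvGoSplit_ne_nil _ _ _ _

def pvStrip (p : List Char) : List Char := PySem.Chars.stripChars p ['[', ']']

def pvBodyA (ip : Int × List Char) : List Char :=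
  let part := PySem.Chars.stripChars ip.2 ['[', ']']
  if ip.1 == 0 then
    if ¬ PySem.Chars.startswith part ['_'] then '_' :: part else part
  else
    let part_clean := part.dropWhile (fun c => c == '_')
    if ¬ part_clean.isEmpty then '_' :: part_clean else part

def pvBodyT (p : List Char) : List Char :=
  let part := PySem.Chars.stripChars p ['[', ']']
  let part_clean := part.dropWhile (fun c => c == '_')
  if ¬ part_clean.isEmpty then '_' :: part_clean else part

lemma pvEnumMap : ∀ (ps : List (List Char)) (k : Int), 1 ≤ k →
    (PySem.List.enumerate ps k).map pvBodyA = ps.map pvBodyT := by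
  intro ps
  induction ps with
  | nil => intro k hk; simp [PySem.List.enumerate_nil]
  | cons p t ih =>
    intro k hk
    rw [PySem.List.enumerate_cons, List.map_cons, List.map_cons, ih (k + 1) (by omega)]
    congr 1
    have hk0 : (k == (0 : Int)) = false := by simp; omega
    simp only [pvBodyA, pvBodyT, hk0, if_false, Bool.false_eq_true]

lemma pvSlotT (p : List Char) : pvCeq ('_' :: pvBodyT p) ('_' :: pvStrip p) := by
  by_cases h : ((PySem.Chars.stripChars p ['[', ']']).dropWhile (fun c => c == '_')).isEmpty = true
  · simp only [pvStrip]
    have hb : pvBodyT p = PySem.Chars.stripChars p ['[', ']'] := by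
      simp [pvBodyT, h]
    rw [hb]
    exact pvCeq_refl _
  · have hb : pvBodyT p = '_' :: (PySem.Chars.stripChars p ['[', ']']).dropWhile (fun c => c == '_') := by
      simp [pvBodyT, h]
    rw [hb]
    exact pvCeq_trans (pvCeq_dd _) (pvCeq_drop _)

lemma pvSlot0 (p : List Char) : pvCeq (pvBodyA (0, p)) ('_' :: pvStrip p) := by
  by_cases h : PySem.Chars.startswith (PySem.Chars.stripChars p ['[', ']']) ['_'] = true
  · obtain ⟨r, hr⟩ := (PySem.Chars.startswith_iff _ _).mp h
    have hb : pvBodyA (0, p) = PySem.Chars.stripChars p ['[', ']'] := by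
      simp only [pvBodyA, h]
      simp
    rw [hb, pvStrip, ← hr]
    simp only [List.cons_append, List.nil_append]
    exact pvCeq_symm (pvCeq_dd r)
  · have hb : pvBodyA (0, p) = '_' :: PySem.Chars.stripChars p ['[', ']'] := by
      simp only [pvBodyA, h]
      simp
    rw [hb, pvStrip]
    exact pvCeq_refl _

lemma pvMain : ∀ (ps : List (List Char)) (x y : List Char), pvCeq x y →
    pvC1 false (x ++ ps.flatMap (fun p => '_' :: pvBodyT p)) =
    pvC1 false (y ++ ps.flatMap (fun p => '_' :: pvStrip p)) := by
  intro ps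
  induction ps with
  | nil => intro x y h; simpa using (h false).1
  | cons p t ih =>
    intro x y h
    rw [List.flatMap_cons, List.flatMap_cons, ← List.append_assoc, ← List.append_assoc]
    exact ih _ _ (pvCeq_append h (pvSlotT p))

lemma pvJoinFlat (x : List Char) (xs : List (List Char)) :
    PySem.Chars.join ['_'] (x :: xs) = x ++ xs.flatMap (fun y => '_' :: y) := by
  induction xs generalizing x with
  | nil => simp [PySem.Chars.join_singleton]
  | cons y t ih => rw [PySem.Chars.join_cons_cons, ih y]; simp

lemma pvGetNeg1 (out : List Char) : PySem.List.pyGet? out (-1) = out.getLast? := by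
  cases out with
  | nil => rfl
  | cons c t => simp [PySem.List.pyGet?, PySem.List.pyIdx?, List.getLast?_eq_getElem?]

lemma pvFold (rest : List Char) : ∀ acc,
    List.foldl pvCollapseStep acc rest = acc ++ pvC1 (acc.getLast? == some '_') rest := by
  induction rest with
  | nil => intro acc; simp [pvC1]
  | cons c t ih =>
    intro acc
    rw [List.foldl_cons]
    by_cases h : (c = '_' ∧ acc.getLast? = some '_')
    · obtain ⟨h1, h2⟩ := h
      subst h1
      have hne : acc ≠ [] := by intro hx; rw [hx] at h2; simp at h2
      have hstep : pvCollapseStep acc '_' = acc := by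
        simp [pvCollapseStep, pvGetNeg1, h2, hne]
      rw [hstep, ih]
      simp [pvC1, h2]
    · have hcond : ¬ c = '_' ∨ acc = [] ∨ ¬ PySem.List.pyGet? acc (-1) = some '_' := by
        rw [pvGetNeg1]
        by_cases hc : c = '_'
        · right; right; intro hx; exact h ⟨hc, hx⟩
        · left; exact hc
      have hstep : pvCollapseStep acc c = acc ++ [c] := by
        rw [pvCollapseStep, if_pos hcond]
      rw [hstep, ih]
      have hl : (acc ++ [c]).getLast? = some c := by simp
      rw [hl]
      have hb : ((c == '_') && (acc.getLast? == some '_')) = false := by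
        by_cases hc : c = '_'
        · have h2 : ¬ acc.getLast? = some '_' := fun hx => h ⟨hc, hx⟩
          simp [h2]
        · simp [hc]
      simp [pvC1, hb, List.append_assoc]

-- ===== VERDICT (by name: the statement is the Claim_ definition above) =====
theorem normalize_table_name_py_spec : Claim_equal_normalize_table_name_py := by
  intro s _
  unfold Spec_normalize_table_name_py normalize_table_name_py normalize_table_name_py_alt
  by_cases hdot : PySem.Chars.isIn ['.'] s.toList = true
  · simp only [hdot, if_true]
    obtain ⟨p0, ps, hparts⟩ : ∃ p0 ps, PySem.Chars.splitOn s.toList ['.'] = p0 :: ps := by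
      cases hh : PySem.Chars.splitOn s.toList ['.'] with
      | nil => exact absurd hh (pvSplit_ne_nil _)
      | cons a b => exact ⟨a, b, rfl⟩
    simp only [hparts]
    congr 1
    have hbe : (fun (acc : List (List Char)) (ip : Int × List Char) =>
        let part := PySem.Chars.stripChars ip.2 ['[', ']']
        if ip.1 == 0 then
          if ¬ PySem.Chars.startswith part ['_'] then acc ++ ['_' :: part] else acc ++ [part]
        else
          let part_clean := part.dropWhile (fun c => c == '_')
          if ¬ part_clean.isEmpty then acc ++ ['_' :: part_clean] else acc ++ [part])
        = fun acc ip => acc ++ [pvBodyA ip] := by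
      funext acc ip
      simp only [pvBodyA]
      split_ifs <;> rfl
    rw [hbe, PySem.List.foldl_append_singleton_eq_map, List.nil_append]
    rw [PySem.List.enumerate_cons, List.map_cons, show (0:Int)+1 = 1 from rfl, pvEnumMap ps 1 (by omega)]
    rw [pvWhileCollapse_eq, pvFold, List.nil_append]
    rw [pvJoinFlat, List.map_cons, pvJoinFlat]
    have hflat1 : (ps.map pvBodyT).flatMap (fun y => '_' :: y)
        = ps.flatMap (fun p => '_' :: pvBodyT p) := by
      rw [List.flatMap_map]
    have hflat2 : (ps.map (fun p => PySem.Chars.stripChars p ['[', ']'])).flatMap (fun y => '_' :: y)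
        = ps.flatMap (fun p => '_' :: pvStrip p) := by
      rw [List.flatMap_map]
      simp only [pvStrip]
    rw [hflat1, hflat2]
    have hlast : (([] : List Char).getLast? == some '_') = false := by rfl
    rw [hlast]
    rw [show ('_' :: (PySem.Chars.stripChars p0 ['[', ']'] ++ ps.flatMap (fun p => '_' :: pvStrip p)))
        = ('_' :: pvStrip p0) ++ ps.flatMap (fun p => '_' :: pvStrip p) from rfl]
    exact pvMain ps _ _ (pvSlot0 p0)
  · simp only [hdot]
    simp
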